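-- pv_equiv track=rewrite | github.com/Rishiii7/Design-Pattern | Leetcode/Level-1/B.py | precompute_sequences
-- ===== SOURCE A (Python) =====
-- def precompute_sequences(max_n):
--     sequences = {}
--     for n in range(1, max_n + 1):
--         a = []
--         for i in range(1, n + 1):
--             candidate = max(a[-1] + 1 if a else 1, i)
--             while any(candidate % i == a[j] % (j + 1) for j in range(len(a))):
--                 candidate += 1
--             a.append(candidate)
--         sequences[n] = a
--     return sequences
-- ===== SOURCE B (Python) =====
-- def precompute_sequences(max_n):
--     # The constraint "candidate % i != a[j] % (j+1) for all j" together with the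
--     # minimal increasing choice forces a[j] % (j+1) == j, whose least increasing
--     # solution is a[j] = 2*j + 1: the sequence is simply the odd numbers.
--     return {n: [2 * k + 1 for k in range(n)] for n in range(1, max_n + 1)}
-- ===== Notes on version B (the rewrite author's own statement) =====
-- stated objective: faster
-- what changed: B replaces A's nested constructive search entirely by the closed form: the sequence for n is the first n odd numbers [1,3,...,2n-1], proved equal to what A's candidate search constructs.
import Mathlib
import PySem

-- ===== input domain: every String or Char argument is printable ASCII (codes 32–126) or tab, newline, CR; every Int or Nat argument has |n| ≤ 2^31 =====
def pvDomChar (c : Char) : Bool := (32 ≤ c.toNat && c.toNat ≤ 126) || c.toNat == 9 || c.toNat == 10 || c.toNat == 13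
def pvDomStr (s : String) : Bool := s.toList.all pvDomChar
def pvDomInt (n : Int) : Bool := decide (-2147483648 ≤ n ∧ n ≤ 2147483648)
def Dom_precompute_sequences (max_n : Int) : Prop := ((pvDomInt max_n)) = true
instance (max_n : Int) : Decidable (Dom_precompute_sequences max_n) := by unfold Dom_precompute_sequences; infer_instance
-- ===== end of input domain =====

-- B replaces A's per-n candidate search by the closed form {n: first n odd numbers},
-- proved equal to what A constructs (objective: faster, asymptotic).

-- ===== PORT A =====
-- any(candidate % i == a[j] % (j + 1) for j in range(len(a)))
def pvConflict (a : List Int) (i cand : Int) : Bool :=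
  (PySem.List.enumerate a 0).any (fun p => PySem.Int.mod cand i == PySem.Int.mod p.2 (p.1 + 1))

-- the while loop: candidate += 1 until no conflict.  The fuel a.length + 1 is exact, not a
-- truncation: in every call i = a.length + 1, the a.length + 1 consecutive candidates have
-- pairwise distinct residues mod i while at most a.length residues are forbidden, so the
-- Python loop stops within the first a.length + 1 candidates, all of which pvFind examines.
def pvFind (a : List Int) (i : Int) : Int → Nat → Int
  | cand, 0 => cand
  | cand, fuel + 1 => if pvConflict a i cand then pvFind a i (cand + 1) fuel else cand

-- one iteration of the inner `for i in range(1, n+1)` body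
def pvStep (a : List Int) (i : Int) : List Int :=
  let cand0 := max (match a.getLast? with | some x => x + 1 | none => 1) i
  a ++ [pvFind a i cand0 (a.length + 1)]

def precompute_sequences (max_n : Int) : List (Int × List Int) :=
  ((PySem.List.pyRange 1 (max_n + 1) 1).foldl
    (fun sequences n =>
      sequences.insert n ((PySem.List.pyRange 1 (n + 1) 1).foldl pvStep []))
    PySem.Dict.empty).items

-- ===== PORT B =====
def precompute_sequences_alt (max_n : Int) : List (Int × List Int) :=
  ((PySem.List.pyRange 1 (max_n + 1) 1).foldl
    (fun d n => d.insert n ((PySem.List.pyRange 0 n 1).map (fun k => 2 * k + 1)))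
    PySem.Dict.empty).items

-- ===== PRECONDITION & SPEC =====
def Spec_precompute_sequences (max_n : Int) (out : List (Int × List Int)) : Prop := out = precompute_sequences_alt max_n
instance (max_n : Int) (out : List (Int × List Int)) : Decidable (Spec_precompute_sequences max_n out) := by unfold Spec_precompute_sequences; infer_instance

-- ===== CLAIM (what is proved, stated in full; the proofs are below) =====
def Claim_equal_precompute_sequences : Prop := ∀ (max_n : Int), Dom_precompute_sequences max_n → Spec_precompute_sequences max_n (precompute_sequences max_n)

-- ===== LEMMAS AND PROOFS =====

-- proof-side Nat-indexed view of A's inner build loop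
def pvBN : Nat → List Int
  | 0 => []
  | k + 1 => pvStep (pvBN k) ((k : Int) + 1)

-- the first k odd numbers, the value B assigns
def pvOdds (k : Nat) : List Int := (List.range k).map (fun j : Nat => 2 * (j : Int) + 1)

theorem pvBuild_eq_bn (k : Nat) :
    (PySem.List.pyRange 1 ((k : Int) + 1) 1).foldl pvStep [] = pvBN k := by
  induction k with
  | zero => simp [PySem.List.pyRange_one_eq_nil, pvBN]
  | succ k ih =>
    have h : PySem.List.pyRange 1 (((k + 1 : Nat) : Int) + 1) 1
        = PySem.List.pyRange 1 ((k : Int) + 1) 1 ++ [(k : Int) + 1] := by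
      have := PySem.List.pyRange_one_succ_right (a := 1) (b := (k : Int) + 1) (by omega)
      push_cast
      exact this
    rw [h, List.foldl_append, ih]
    rfl

theorem pvOdds_succ (k : Nat) : pvOdds (k + 1) = pvOdds k ++ [2 * (k : Int) + 1] := by
  simp [pvOdds, List.range_succ]

theorem pvOdds_length (k : Nat) : (pvOdds k).length = k := by simp [pvOdds]

theorem pvOdds_getElem (k m : Nat) (h : m < (pvOdds k).length) :
    (pvOdds k)[m] = 2 * (m : Int) + 1 := by
  unfold pvOdds at h ⊢
  rw [List.getElem_map, List.getElem_range]

theorem pv_mod_odd (j : Nat) :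
    PySem.Int.mod (2 * (j : Int) + 1) ((j : Int) + 1) = (j : Int) := by
  rw [PySem.Int.mod_eq_emod_of_pos (by omega)]
  have h : (2 * (j : Int) + 1) = (j : Int) + ((j : Int) + 1) * 1 := by ring
  rw [h, Int.add_mul_emod_self_left, Int.emod_eq_of_lt (by omega) (by omega)]

-- conflict on pvOdds k with modulus i: a residue equal to that of some indexed entry
theorem pvConflict_odds (k : Nat) (i cand : Int) :
    pvConflict (pvOdds k) i cand = true ↔
      ∃ j : Nat, j < k ∧ PySem.Int.mod cand i = PySem.Int.mod (2 * (j : Int) + 1) ((j : Int) + 1) := by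
  unfold pvConflict
  rw [List.any_eq_true]
  constructor
  · rintro ⟨p, hp, hb⟩
    rw [PySem.List.mem_enumerate_iff] at hp
    obtain ⟨m, hm, rfl⟩ := hp
    refine ⟨m, by simpa [pvOdds_length] using hm, ?_⟩
    rw [pvOdds_getElem k m hm] at hb
    simp only [beq_iff_eq] at hb
    simpa using hb
  · rintro ⟨j, hj, hmod⟩
    have hjl : j < (pvOdds k).length := by rw [pvOdds_length]; exact hj
    refine ⟨((0 : Int) + (j : Int), (pvOdds k)[j]), ?_, ?_⟩
    · rw [PySem.List.mem_enumerate_iff]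
      exact ⟨j, hjl, rfl⟩
    · rw [pvOdds_getElem k j hjl]
      simp only [beq_iff_eq]
      simpa using hmod

-- no conflict at 2k+1 (its residue mod k+1 is k, not any j < k)
theorem pvConflict_at_odd (k : Nat) :
    pvConflict (pvOdds k) ((k : Int) + 1) (2 * (k : Int) + 1) = false := by
  rw [Bool.eq_false_iff]
  intro h
  rw [pvConflict_odds] at h
  obtain ⟨j, hj, hmod⟩ := h
  rw [pv_mod_odd, pv_mod_odd] at hmod
  omega

-- conflict at 2k for k ≥ 1 (residue k-1 is forbidden by index j = k-1)
theorem pvConflict_at_even (k : Nat) (hk : 1 ≤ k) :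
    pvConflict (pvOdds k) ((k : Int) + 1) (2 * (k : Int)) = true := by
  rw [pvConflict_odds]
  refine ⟨k - 1, by omega, ?_⟩
  rw [pv_mod_odd, PySem.Int.mod_eq_emod_of_pos (by omega)]
  have h : (2 * (k : Int)) = ((k : Int) - 1) + ((k : Int) + 1) * 1 := by ring
  rw [h, Int.add_mul_emod_self_left, Int.emod_eq_of_lt (by omega) (by omega)]
  push_cast [hk]
  ring

-- the while loop from candidate 2k stops at 2k+1 (fuel ≥ 2 suffices)
theorem pvFind_even (k f : Nat) (hk : 1 ≤ k) :
    pvFind (pvOdds k) ((k : Int) + 1) (2 * (k : Int)) (f + 2) = 2 * (k : Int) + 1 := by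
  show pvFind (pvOdds k) ((k : Int) + 1) (2 * (k : Int)) (f + 1 + 1) = _
  unfold pvFind
  rw [pvConflict_at_even k hk]
  simp only [if_true]
  unfold pvFind
  rw [pvConflict_at_odd k]
  simp

theorem pvBN_eq_odds (k : Nat) : pvBN k = pvOdds k := by
  induction k with
  | zero => rfl
  | succ k ih =>
    show pvStep (pvBN k) ((k : Int) + 1) = pvOdds (k + 1)
    rw [ih, pvOdds_succ]
    unfold pvStep
    rw [pvOdds_length]
    cases k with
    | zero =>
      simp [pvOdds, pvFind, pvConflict]
    | succ m =>
      have hlast : (pvOdds (m + 1)).getLast? = some (2 * (m : Int) + 1) := by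
        rw [pvOdds_succ]; simp
      have hc0 : max (match (pvOdds (m + 1)).getLast? with
          | some x => x + 1 | none => 1) (((m + 1 : Nat) : Int) + 1)
          = 2 * ((m + 1 : Nat) : Int) := by
        simp only [hlast]
        have h1 : ((m + 1 : Nat) : Int) + 1 ≤ 2 * (m : Int) + 1 + 1 := by push_cast; omega
        rw [max_eq_left h1]
        push_cast; ring
      rw [hc0]
      show pvOdds (m + 1) ++
          [pvFind (pvOdds (m + 1)) (((m + 1 : Nat) : Int) + 1) (2 * ((m + 1 : Nat) : Int)) (m + 2)]
        = pvOdds (m + 1) ++ [2 * ((m + 1 : Nat) : Int) + 1]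
      rw [pvFind_even (m + 1) m (by omega)]

theorem pv_key (max_n : Int) :
    ∀ n ∈ PySem.List.pyRange 1 (max_n + 1) 1,
      (PySem.List.pyRange 1 (n + 1) 1).foldl pvStep []
        = (PySem.List.pyRange 0 n 1).map (fun k => 2 * k + 1) := by
  intro n hn
  rw [PySem.List.mem_pyRange_one] at hn
  obtain ⟨h1, _⟩ := hn
  obtain ⟨k, rfl⟩ : ∃ k : Nat, n = (k : Int) := ⟨n.toNat, (Int.toNat_of_nonneg (by omega)).symm⟩
  rw [pvBuild_eq_bn, pvBN_eq_odds, PySem.List.pyRange_zero_natCast, List.map_map]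
  simp [pvOdds, Function.comp_def]

-- ===== VERDICT (by name: the statement is the Claim_ definition above) =====
theorem precompute_sequences_spec : Claim_equal_precompute_sequences := by
  intro max_n _
  unfold Spec_precompute_sequences precompute_sequences precompute_sequences_alt
  have fresh : ∀ n ∈ PySem.List.pyRange 1 (max_n + 1) 1,
      (PySem.Dict.empty : PySem.Dict Int (List Int)).contains ((fun n : Int => n) n) = false := by
    intro n _; exact PySem.Dict.contains_empty n
  have nd : ((PySem.List.pyRange 1 (max_n + 1) 1).map (fun n : Int => n)).Nodup := by
    simpa using PySem.List.nodup_pyRange_one 1 (max_n + 1)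
  rw [PySem.Dict.items_foldl_insert_fresh _ _ _ _ fresh nd,
      PySem.Dict.items_foldl_insert_fresh _ _ _ _ fresh nd]
  exact congrArg _ (List.map_congr_left (fun n hn => by rw [pv_key max_n n hn]))
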